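-- pv_equiv track=rewrite | github.com/jpw142/CS111-Coursework | lab4/lab4task3.py | negate_evens
-- ===== SOURCE A (Python) =====
-- def negate_evens(vals):
--     if len(vals) == 0:
--         return []
--     rest_negate = negate_evens(vals[1:])
--     if vals[0] % 2 == 0:
--         return [-1 * vals[0]] + rest_negate
--     else:
--         return [vals[0]] + rest_negate
-- ===== SOURCE B (Python) =====
-- def negate_evens(vals):
--     result = []
--     for x in vals:
--         if x % 2 == 0:
--             result.append(-x)
--         else:
--             result.append(x)
--     return result
-- ===== Notes on version B (the rewrite author's own statement) =====
-- stated objective: idiomatic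
-- what changed: Replaces A's recursion (which rebuilds vals[1:] slices and prepends with list concatenation) by a single iterative for-loop appending into an accumulator list.
import Mathlib
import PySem

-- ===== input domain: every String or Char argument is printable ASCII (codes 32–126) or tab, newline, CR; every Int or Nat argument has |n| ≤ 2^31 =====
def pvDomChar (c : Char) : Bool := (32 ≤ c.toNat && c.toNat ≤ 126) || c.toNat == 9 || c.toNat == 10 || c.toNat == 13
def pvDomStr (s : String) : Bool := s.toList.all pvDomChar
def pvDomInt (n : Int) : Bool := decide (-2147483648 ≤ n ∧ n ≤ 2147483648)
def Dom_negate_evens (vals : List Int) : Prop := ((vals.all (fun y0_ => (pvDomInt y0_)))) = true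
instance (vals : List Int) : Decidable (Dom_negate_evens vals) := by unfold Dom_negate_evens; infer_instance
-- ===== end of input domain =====

-- B replaces A's recursion (slice + list concatenation at each step) by one iterative
-- append-accumulator loop; equivalence of the RETURN value is proved for all inputs.

-- ===== PORT A =====
-- A: if len(vals)==0 return []; recurse on vals[1:]; prepend -1*vals[0] if even else vals[0].
def negate_evens (vals : List Int) : List Int :=
  match vals with
  | [] => []
  | v0 :: rest =>
    let rest_negate := negate_evens rest
    if PySem.Int.mod v0 2 = 0 then
      [-1 * v0] ++ rest_negate
    else
      [v0] ++ rest_negate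

-- ===== PORT B =====
-- B: result = []; for x in vals: append (-x if x % 2 == 0 else x); return result.
def negate_evens_alt (vals : List Int) : List Int :=
  vals.foldl (fun result x =>
    if PySem.Int.mod x 2 = 0 then result ++ [-x] else result ++ [x]) []

-- ===== PRECONDITION & SPEC =====
def Spec_negate_evens (vals : List Int) (out : List Int) : Prop := out = negate_evens_alt vals
instance (vals : List Int) (out : List Int) : Decidable (Spec_negate_evens vals out) := by unfold Spec_negate_evens; infer_instance

-- ===== CLAIM (what is proved, stated in full; the proofs are below) =====
def Claim_equal_negate_evens : Prop := ∀ (vals : List Int), Dom_negate_evens vals → Spec_negate_evens vals (negate_evens vals)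

-- ===== LEMMAS AND PROOFS =====
theorem negate_evens_alt_acc (vals : List Int) (acc : List Int) :
    vals.foldl (fun result x =>
      if PySem.Int.mod x 2 = 0 then result ++ [-x] else result ++ [x]) acc
      = acc ++ negate_evens vals := by
  induction vals generalizing acc with
  | nil => simp [negate_evens]
  | cons v rest ih =>
    simp only [List.foldl_cons, negate_evens]
    by_cases h : PySem.Int.mod v 2 = 0
    · rw [if_pos h, if_pos h, ih]; simp
    · rw [if_neg h, if_neg h, ih]; simp

-- ===== VERDICT (by name: the statement is the Claim_ definition above) =====
theorem negate_evens_spec : Claim_equal_negate_evens := by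
  intro vals _
  unfold Spec_negate_evens negate_evens_alt
  exact ((negate_evens_alt_acc vals []).trans (List.nil_append _)).symm
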